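-- pv_equiv track=rewrite | github.com/NicolasBizzozzero/AdventOfCode-2024 | src/problems/year2024/day09.py | block_defragmentation
-- ===== SOURCE A (Python) =====
-- def block_defragmentation(blocks: list[int]) -> list[int]:
--     while -1 in blocks:
--         # Remove empty last block
--         if blocks[-1] == -1:
--             blocks.pop()
--         else:
--             # Replace first empty block by last block
--             idx_empty_block = blocks.index(-1)
--             blocks[idx_empty_block] = blocks.pop()
--     return blocks
-- ===== SOURCE B (Python) =====
-- def block_defragmentation(blocks: list[int]) -> list[int]:
--     # One pass: keep the non-empty blocks; the first len(keep) slots are kept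
--     # as-is when occupied and filled from the tail of keep when empty.
--     keep = [x for x in blocks if x != -1]
--     fill = iter(reversed(keep))
--     out = [x if x != -1 else next(fill) for x in blocks[:len(keep)]]
--     blocks[:] = out
--     return blocks
-- ===== Notes on version B (the rewrite author's own statement) =====
-- stated objective: alternative
-- what changed: A repeatedly rescans the list ('-1 in blocks', 'blocks.index(-1)') and moves one element per iteration; B does a single pass that keeps the non-empty blocks and fills the empty slots of the kept prefix from the tail of the kept values.
import Mathlib
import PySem

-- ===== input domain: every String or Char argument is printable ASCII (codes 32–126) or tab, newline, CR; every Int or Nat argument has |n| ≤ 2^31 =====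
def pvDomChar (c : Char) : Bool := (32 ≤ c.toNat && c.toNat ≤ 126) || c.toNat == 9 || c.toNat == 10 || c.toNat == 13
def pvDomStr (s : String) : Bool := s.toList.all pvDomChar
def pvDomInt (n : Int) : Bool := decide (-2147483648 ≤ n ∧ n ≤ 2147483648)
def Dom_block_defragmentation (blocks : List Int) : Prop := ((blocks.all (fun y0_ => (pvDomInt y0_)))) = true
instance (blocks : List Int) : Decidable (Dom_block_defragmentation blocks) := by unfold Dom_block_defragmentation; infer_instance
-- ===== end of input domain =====

-- B replaces A's rescan-and-move while-loop by a single pass that keeps the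
-- non-empty blocks and fills the empty slots of the kept prefix from the tail.
-- Python A and B both mutate the argument list in place so that it equals the
-- returned list; the equivalence proved here is about the return value.

-- ===== PORT A =====
-- A: while -1 in blocks: if last == -1 pop, else blocks[first -1 index] = blocks.pop().
-- blocks[-1]/pop are ported as getLast/dropLast (the list is nonempty since -1 ∈ blocks);
-- blocks.index(-1) is PySem.List.index? (-1 is present, so .getD 0 never takes the default).
def block_defragmentation (blocks : List Int) : List Int :=
  if h : (-1 : Int) ∈ blocks then
    if blocks.getLast (List.ne_nil_of_mem h) = -1 then
      block_defragmentation blocks.dropLast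
    else
      let idx := (PySem.List.index? blocks (-1)).getD 0
      block_defragmentation (blocks.dropLast.set idx (blocks.getLast (List.ne_nil_of_mem h)))
  else blocks
termination_by blocks.length
decreasing_by
  · have : 0 < blocks.length := List.length_pos_of_mem h
    simp only [List.length_dropLast]; omega
  · have : 0 < blocks.length := List.length_pos_of_mem h
    simp only [List.length_set, List.length_dropLast]; omega

-- ===== PORT B =====
-- the comprehension's filter `x != -1`
def keepP (x : Int) : Bool := x != -1

-- the list comprehension consuming `fill = iter(reversed(keep))`, one element
-- per empty slot (next(fill) never exhausts on the taken prefix)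
def altFill : List Int → List Int → List Int
  | [], _ => []
  | x :: xs, fs =>
    if keepP x then x :: altFill xs fs
    else
      match fs with
      | f :: fs' => f :: altFill xs fs'
      | [] => []  -- next() on an exhausted iterator; unreachable on the taken prefix

def block_defragmentation_alt (blocks : List Int) : List Int :=
  altFill (blocks.take (blocks.filter keepP).length) (blocks.filter keepP).reverse

-- ===== PRECONDITION & SPEC =====
def Spec_block_defragmentation (blocks : List Int) (out : List Int) : Prop := out = block_defragmentation_alt blocks
instance (blocks : List Int) (out : List Int) : Decidable (Spec_block_defragmentation blocks out) := by unfold Spec_block_defragmentation; infer_instance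

-- ===== CLAIM (what is proved, stated in full; the proofs are below) =====
def Claim_equal_block_defragmentation : Prop := ∀ (blocks : List Int), Dom_block_defragmentation blocks → Spec_block_defragmentation blocks (block_defragmentation blocks)

-- ===== LEMMAS AND PROOFS =====

theorem keepP_eq_true {x : Int} : keepP x = true ↔ x ≠ -1 := by
  simp [keepP]

theorem filter_keepP_eq_self {p : List Int} (hp : (-1 : Int) ∉ p) : p.filter keepP = p := by
  rw [List.filter_eq_self]
  intro a ha
  exact keepP_eq_true.mpr (fun e => hp (e ▸ ha))

theorem altFill_cons (x : Int) (xs fs : List Int) :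
    altFill (x :: xs) fs = if keepP x then x :: altFill xs fs
      else match fs with | f :: fs' => f :: altFill xs fs' | [] => [] := rfl

theorem altFill_no_neg (xs fs : List Int) (h : (-1 : Int) ∉ xs) : altFill xs fs = xs := by
  induction xs with
  | nil => rfl
  | cons x xs ih =>
    simp only [List.mem_cons, not_or] at h
    rw [altFill_cons, if_pos (keepP_eq_true.mpr (Ne.symm h.1)), ih h.2]

theorem alt_no_neg (bs : List Int) (h : (-1 : Int) ∉ bs) : block_defragmentation_alt bs = bs := by
  unfold block_defragmentation_alt
  rw [filter_keepP_eq_self h, List.take_length, altFill_no_neg _ _ h]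

theorem alt_drop_last (ys : List Int) : block_defragmentation_alt (ys ++ [-1]) = block_defragmentation_alt ys := by
  have hk : (ys.filter keepP).length ≤ ys.length := List.length_filter_le _ _
  unfold block_defragmentation_alt
  have hfilt : (ys ++ [-1]).filter keepP = ys.filter keepP := by
    rw [List.filter_append]; simp [keepP]
  rw [hfilt, List.take_append_of_le_length hk]

theorem altFill_skip (p xs fs : List Int) (h : (-1 : Int) ∉ p) :
    altFill (p ++ xs) fs = p ++ altFill xs fs := by
  induction p with
  | nil => rfl
  | cons a p ih =>
    simp only [List.mem_cons, not_or] at h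
    rw [List.cons_append, altFill_cons, if_pos (keepP_eq_true.mpr (Ne.symm h.1)), ih h.2, List.cons_append]

theorem altFill_fill_prefix (xs fs g g' : List Int) (h : xs.count (-1) ≤ fs.length) :
    altFill xs (fs ++ g) = altFill xs (fs ++ g') := by
  induction xs generalizing fs with
  | nil => rfl
  | cons x xs ih =>
    by_cases hx : x = -1
    · subst hx
      cases fs with
      | nil => simp at h
      | cons f fs =>
        have hc : xs.count (-1) ≤ fs.length := by
          simp at h; omega
        have hk : keepP (-1 : Int) = false := by simp [keepP]
        rw [List.cons_append, altFill_cons, hk, List.cons_append, altFill_cons, hk]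
        simp only [Bool.false_eq_true, if_false]
        rw [ih fs hc]
    · have hc : xs.count (-1) ≤ fs.length := by
        simp [hx] at h; omega
      rw [altFill_cons, if_pos (keepP_eq_true.mpr hx), altFill_cons, if_pos (keepP_eq_true.mpr hx), ih fs hc]

theorem alt_move (p q : List Int) (v : Int) (hp : (-1 : Int) ∉ p) (hv : v ≠ -1) :
    block_defragmentation_alt (p ++ -1 :: q ++ [v]) = block_defragmentation_alt (p ++ v :: q) := by
  have hfp := filter_keepP_eq_self hp
  set kq := q.filter keepP with hkq
  have hkql : kq.length ≤ q.length := List.length_filter_le _ _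
  have hkv : keepP v = true := keepP_eq_true.mpr hv
  have hkn : keepP (-1) = false := by simp [keepP]
  have hkeepL : (p ++ -1 :: q ++ [v]).filter keepP = p ++ (kq ++ [v]) := by
    simp only [List.filter_append, List.filter_cons, hkn, hfp, ← hkq, hkv]
    simp
  have hkeepR : (p ++ v :: q).filter keepP = p ++ v :: kq := by
    simp only [List.filter_append, List.filter_cons, hkv, hfp, ← hkq]
    simp
  have htakeL : (p ++ -1 :: q ++ [v]).take (p ++ (kq ++ [v])).length
      = p ++ -1 :: q.take kq.length := by
    have h1 : (p ++ (kq ++ [v])).length = p.length + (kq.length + 1) := by simp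
    have h2 : p ++ -1 :: q ++ [v] = p ++ (-1 :: q ++ [v]) := by simp
    rw [h1, h2, List.take_append, List.take_of_length_le (by omega)]
    have h3 : p.length + (kq.length + 1) - p.length = kq.length + 1 := by omega
    rw [h3, show List.take (kq.length + 1) (((-1 : Int) :: q) ++ [v]) = -1 :: List.take kq.length (q ++ [v]) from rfl,
      List.take_append_of_le_length hkql]
  have htakeR : (p ++ v :: q).take (p ++ v :: kq).length
      = p ++ v :: q.take kq.length := by
    have h1 : (p ++ v :: kq).length = p.length + (kq.length + 1) := by simp
    rw [h1, List.take_append, List.take_of_length_le (by omega)]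
    have h4 : p.length + (kq.length + 1) - p.length = kq.length + 1 := by omega
    rw [h4, show List.take (kq.length + 1) (v :: q) = v :: List.take kq.length q from rfl]
  have hcount : (q.take kq.length).count (-1) ≤ kq.reverse.length := by
    calc (q.take kq.length).count (-1) ≤ (q.take kq.length).length := List.count_le_length
    _ ≤ kq.reverse.length := by simp [List.length_take]
  unfold block_defragmentation_alt
  simp only [hkeepL, hkeepR, htakeL, htakeR]
  rw [altFill_skip _ _ _ hp, altFill_skip _ _ _ hp]
  have hrevL : (p ++ (kq ++ [v])).reverse = v :: (kq.reverse ++ p.reverse) := by simp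
  have hrevR : (p ++ v :: kq).reverse = kq.reverse ++ (v :: p.reverse) := by simp
  rw [hrevL, hrevR]
  rw [altFill_cons, hkn]
  simp only [Bool.false_eq_true, if_false]
  rw [altFill_cons, if_pos hkv]
  rw [altFill_fill_prefix _ _ p.reverse (v :: p.reverse) hcount]

-- the set at the first -1 of dropLast
theorem set_at_prefix (p q : List Int) (v : Int) :
    (p ++ -1 :: q).set p.length v = p ++ v :: q := by
  induction p with
  | nil => rfl
  | cons a p ih => simp only [List.cons_append, List.length_cons, List.set_cons_succ, ih]

-- ===== VERDICT (by name: the statement is the Claim_ definition above) =====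
theorem block_defragmentation_spec : Claim_equal_block_defragmentation := by
  intro blocks hdom
  clear hdom
  show block_defragmentation blocks = block_defragmentation_alt blocks
  induction blocks using block_defragmentation.induct with
  | case3 bs h => rw [block_defragmentation]; simp only [dif_neg h]; rw [alt_no_neg bs h]
  | case1 bs h hlast ih =>
    have hne := List.ne_nil_of_mem h
    have hbs : bs = bs.dropLast ++ [-1] := by
      conv_lhs => rw [← List.dropLast_concat_getLast hne]
      rw [hlast]
    rw [block_defragmentation]; simp only [dif_pos h, if_pos hlast]
    rw [ih]
    conv_rhs => rw [hbs]
    rw [alt_drop_last]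
  | case2 bs h hlast idx ih =>
    have hne := List.ne_nil_of_mem h
    set v := bs.getLast hne with hv
    obtain ⟨k, hk⟩ : ∃ k, PySem.List.index? bs (-1) = some k :=
      Option.isSome_iff_exists.mp ((PySem.List.index?_isSome_iff bs (-1)).mpr h)
    obtain ⟨pre, suf, hsplit, hlen, hpre⟩ := (PySem.List.index?_eq_some_iff bs (-1) k).mp hk
    have hsufne : suf ≠ [] := by
      rintro rfl
      apply hlast
      rw [hv, List.getLast_congr hne (by simp) hsplit]
      exact List.getLast_concat
    obtain ⟨q, w, hqw⟩ := (List.eq_nil_or_concat suf).resolve_left hsufne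
    have hbs2 : bs = pre ++ -1 :: q ++ [w] := by rw [hsplit, hqw]; simp [List.concat_eq_append]
    have hwv : w = v := by
      have h2 : bs = (pre ++ -1 :: q) ++ [w] := by rw [hbs2]
      rw [hv, List.getLast_congr hne (by simp) h2]
      exact List.getLast_concat.symm
    have hdrop : bs.dropLast = pre ++ -1 :: q := by
      have h2 : bs = (pre ++ -1 :: q) ++ [w] := by rw [hbs2]
      rw [h2, List.dropLast_concat]
    rw [block_defragmentation]; simp only [dif_pos h]
    have ih' : block_defragmentation ((pre ++ -1 :: q).set pre.length v)
        = block_defragmentation_alt ((pre ++ -1 :: q).set pre.length v) := by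
      have e : idx = pre.length := by
        show (PySem.List.index? bs (-1)).getD 0 = pre.length
        rw [hk, Option.getD_some, hlen]
      rw [← e, ← hdrop]; exact ih
    rw [hk, Option.getD_some, ← hlen, hdrop, set_at_prefix]
    rw [if_neg (show ¬ bs.getLast (List.ne_nil_of_mem h) = -1 by rw [← hv]; exact hlast)]
    rw [← hv]
    rw [set_at_prefix] at ih'
    rw [ih']
    conv_rhs => rw [hbs2, hwv]
    rw [alt_move pre q v hpre (by rw [hv] at hlast ⊢; exact hlast)]
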